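-- pv_equiv track=rewrite | github.com/jmaxwell2000/ThreadSieve | src/threadsieve/extractor.py | normalize_with_positions
-- ===== SOURCE A (Python) =====
-- def normalize_with_positions(text: str) -> tuple[str, list[int]]:
--     chars: list[str] = []
--     positions: list[int] = []
--     previous_space = False
--     for index, char in enumerate(text):
--         if char.isspace():
--             if chars and not previous_space:
--                 chars.append(" ")
--                 positions.append(index)
--             previous_space = True
--             continue
--         chars.append(char.lower())
--         positions.append(index)
--         previous_space = False
--     if chars and chars[-1] == " ":
--         chars.pop()
--         positions.pop()
--     return "".join(chars), positions
-- ===== SOURCE B (Python) =====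
-- def normalize_with_positions(text: str) -> tuple[str, list[int]]:
--     # Run-based scan: skip leading whitespace, then alternate word-run /
--     # whitespace-run; a single ' ' separator is emitted only between words,
--     # so no trailing-space pop is ever needed.
--     chars: list[str] = []
--     positions: list[int] = []
--     n = len(text)
--     i = 0
--     while i < n and text[i].isspace():
--         i += 1
--     while i < n:
--         while i < n and not text[i].isspace():
--             chars.append(text[i].lower())
--             positions.append(i)
--             i += 1
--         sep = i
--         while i < n and text[i].isspace():
--             i += 1
--         if i < n:
--             chars.append(" ")
--             positions.append(sep)
--     return "".join(chars), positions
-- ===== Notes on version B (the rewrite author's own statement) =====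
-- stated objective: alternative
-- what changed: Replaces A's single pass with a per-char previous_space flag and a final trailing-space pop by a run-based scan: skip leading whitespace, then alternate an inner word-run loop with an inner whitespace-run loop, emitting one separator only between words so no pop is needed.
import Mathlib
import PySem

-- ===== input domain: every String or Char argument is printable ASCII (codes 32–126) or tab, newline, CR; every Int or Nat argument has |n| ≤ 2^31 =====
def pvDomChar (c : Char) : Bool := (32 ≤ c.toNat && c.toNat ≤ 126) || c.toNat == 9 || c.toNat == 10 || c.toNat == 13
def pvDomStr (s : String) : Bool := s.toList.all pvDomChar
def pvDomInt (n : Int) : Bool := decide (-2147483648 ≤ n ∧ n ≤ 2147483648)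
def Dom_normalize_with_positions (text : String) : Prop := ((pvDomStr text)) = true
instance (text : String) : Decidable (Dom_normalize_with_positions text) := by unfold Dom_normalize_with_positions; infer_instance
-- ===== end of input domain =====

-- B replaces A's per-char previous_space flag by a run-based scan (skip leading
-- whitespace, then alternate word-run / whitespace-run, emitting a separator only
-- between words, so no trailing pop is needed); objective: alternative decomposition.


-- ===== PORT A =====
-- the for-loop over enumerate(text), with the per-char previous_space flag
def nwpLoop (cs : List Char) (i : Int) (chars : List Char) (positions : List Int)
    (prev : Bool) : List Char × List Int :=
  match cs with
  | [] => (chars, positions)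
  | c :: rest =>
    if PySem.Chars.isspace c then
      if chars ≠ [] ∧ prev = false then
        nwpLoop rest (i + 1) (chars ++ [' ']) (positions ++ [i]) true
      else
        nwpLoop rest (i + 1) chars positions true
    else
      nwpLoop rest (i + 1) (chars ++ PySem.Chars.lower [c]) (positions ++ [i]) false

-- the trailing 'if chars and chars[-1] == " ": pop both' step
def nwpFin (r : List Char × List Int) : List Char × List Int :=
  if r.1 ≠ [] ∧ r.1.getLast? = some ' ' then (r.1.dropLast, r.2.dropLast) else r

def normalize_with_positions (text : String) : String × List Int :=
  let r := nwpFin (nwpLoop text.toList 0 [] [] false)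
  (String.mk r.1, r.2)

-- ===== PORT B =====
-- inner 'while i < n and not text[i].isspace()' word loop:
-- returns (emitted chars, emitted positions, rest of input, index after the word)
def nwpAltWord (cs : List Char) (i : Int) : List Char × List Int × List Char × Int :=
  match cs with
  | [] => ([], [], [], i)
  | c :: rest =>
    if PySem.Chars.isspace c then ([], [], c :: rest, i)
    else
      let r := nwpAltWord rest (i + 1)
      (PySem.Chars.lower [c] ++ r.1, i :: r.2.1, r.2.2.1, r.2.2.2)

-- 'while i < n and text[i].isspace()' skip loop: returns (rest of input, new index)
def nwpAltSkip (cs : List Char) (i : Int) : List Char × Int :=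
  match cs with
  | [] => ([], i)
  | c :: rest =>
    if PySem.Chars.isspace c then nwpAltSkip rest (i + 1) else (c :: rest, i)

theorem nwpAltWord_rest_len (cs : List Char) (i : Int) :
    (nwpAltWord cs i).2.2.1.length ≤ cs.length := by
  induction cs generalizing i with
  | nil => simp [nwpAltWord]
  | cons c rest ih =>
    simp only [nwpAltWord]
    split
    · simp
    · exact Nat.le_succ_of_le (ih (i + 1))

theorem nwpAltSkip_len (cs : List Char) (i : Int) :
    (nwpAltSkip cs i).1.length ≤ cs.length := by
  induction cs generalizing i with
  | nil => simp [nwpAltSkip]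
  | cons c rest ih =>
    simp only [nwpAltSkip]
    split
    · exact Nat.le_succ_of_le (ih (i + 1))
    · simp

theorem nwpAlt_dec (c : Char) (rest : List Char) (i : Int) :
    (nwpAltSkip (nwpAltWord (c :: rest) i).2.2.1 (nwpAltWord (c :: rest) i).2.2.2).1.length
      < (c :: rest).length := by
  by_cases h : PySem.Chars.isspace c
  · simp only [nwpAltWord, if_pos h, nwpAltSkip]
    exact Nat.lt_succ_of_le (nwpAltSkip_len rest (i + 1))
  · simp only [nwpAltWord, if_neg h]
    calc (nwpAltSkip (nwpAltWord rest (i + 1)).2.2.1 (nwpAltWord rest (i + 1)).2.2.2).1.length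
        ≤ (nwpAltWord rest (i + 1)).2.2.1.length := nwpAltSkip_len _ _
      _ ≤ rest.length := nwpAltWord_rest_len _ _
      _ < (c :: rest).length := Nat.lt_succ_self _

-- outer 'while i < n' loop
def nwpAltOuter (cs : List Char) (i : Int) : List Char × List Int :=
  match cs with
  | [] => ([], [])
  | c :: rest =>
    let w := nwpAltWord (c :: rest) i
    let s := nwpAltSkip w.2.2.1 w.2.2.2
    if _h : s.1 = [] then (w.1, w.2.1)
    else
      let o := nwpAltOuter s.1 s.2
      (w.1 ++ ' ' :: o.1, w.2.1 ++ w.2.2.2 :: o.2)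
termination_by cs.length
decreasing_by
  exact nwpAlt_dec c rest i

def normalize_with_positions_alt (text : String) : String × List Int :=
  let s := nwpAltSkip text.toList 0
  let r := nwpAltOuter s.1 s.2
  (String.mk r.1, r.2)

-- ===== PRECONDITION & SPEC =====
def Spec_normalize_with_positions (text : String) (out : String × List Int) : Prop := out = normalize_with_positions_alt text
instance (text : String) (out : String × List Int) : Decidable (Spec_normalize_with_positions text out) := by unfold Spec_normalize_with_positions; infer_instance

-- ===== CLAIM (what is proved, stated in full; the proofs are below) =====
def Claim_equal_normalize_with_positions : Prop := ∀ (text : String), Dom_normalize_with_positions text → Spec_normalize_with_positions text (normalize_with_positions text)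

-- ===== LEMMAS AND PROOFS =====

theorem lowerChar_ne_space (c : Char) (h : PySem.Chars.isspace c = false) :
    PySem.Chars.lowerChar c ≠ ' ' := by
  unfold PySem.Chars.lowerChar
  split_ifs with hU
  · have hU' : 65 ≤ c.toNat ∧ c.toNat ≤ 90 := by
      unfold PySem.Chars.isupper at hU
      simp [Char.le_def] at hU
      exact ⟨hU.1, hU.2⟩
    intro hEq
    have hv : (c.toNat + 32).isValidChar := Or.inl (by omega)
    have h2 : (Char.ofNat (c.toNat + 32)).toNat = 32 := by rw [hEq]; rfl
    rw [Char.toNat_ofNat, if_pos hv] at h2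
    omega
  · intro hEq
    subst hEq
    unfold PySem.Chars.isspace at h
    simp at h

theorem nwpLoop_empty_prev (cs : List Char) (i : Int) (p q : Bool) :
    nwpLoop cs i [] [] p = nwpLoop cs i [] [] q := by
  induction cs generalizing i p q with
  | nil => rfl
  | cons c rest ih =>
    by_cases h : PySem.Chars.isspace c
    · simp [nwpLoop, h]
    · simp [nwpLoop, h]

theorem nwpLoop_lead (cs : List Char) (i : Int) :
    nwpLoop cs i [] [] false
      = nwpLoop (nwpAltSkip cs i).1 (nwpAltSkip cs i).2 [] [] false := by
  induction cs generalizing i with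
  | nil => rfl
  | cons c rest ih =>
    by_cases h : PySem.Chars.isspace c
    · simp only [nwpLoop, if_pos h, ne_eq, not_true_eq_false, false_and, if_false,
        nwpAltSkip]
      rw [nwpLoop_empty_prev rest (i + 1) true false, ih]
    · simp [nwpAltSkip, if_neg h]

theorem nwpLoop_word (cs : List Char) (i : Int) (chars : List Char) (pos : List Int) :
    nwpLoop cs i chars pos false
      = nwpLoop (nwpAltWord cs i).2.2.1 (nwpAltWord cs i).2.2.2
          (chars ++ (nwpAltWord cs i).1) (pos ++ (nwpAltWord cs i).2.1) false := by
  induction cs generalizing i chars pos with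
  | nil => simp [nwpAltWord, nwpLoop]
  | cons c rest ih =>
    by_cases h : PySem.Chars.isspace c
    · simp [nwpAltWord, h]
    · rw [show nwpLoop (c :: rest) i chars pos false
            = nwpLoop rest (i + 1) (chars ++ PySem.Chars.lower [c]) (pos ++ [i]) false from by
          simp [nwpLoop, h]]
      rw [ih (i + 1) _ _]
      simp [nwpAltWord, h, PySem.Chars.lower, List.append_assoc]

theorem nwpLoop_sep (cs : List Char) (i : Int) (chars : List Char) (pos : List Int) :
    nwpLoop cs i chars pos true
      = nwpLoop (nwpAltSkip cs i).1 (nwpAltSkip cs i).2 chars pos true := by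
  induction cs generalizing i with
  | nil => rfl
  | cons c rest ih =>
    by_cases h : PySem.Chars.isspace c
    · rw [show nwpLoop (c :: rest) i chars pos true
            = nwpLoop rest (i + 1) chars pos true from by simp [nwpLoop, h]]
      rw [ih (i + 1)]
      simp [nwpAltSkip, h]
    · simp [nwpAltSkip, if_neg h]

theorem nwpLoop_prev_nonspace (cs : List Char) (i : Int) (chars : List Char) (pos : List Int)
    (h : cs = [] ∨ ∃ d rest, cs = d :: rest ∧ PySem.Chars.isspace d = false) :
    nwpLoop cs i chars pos true = nwpLoop cs i chars pos false := by
  rcases h with h | ⟨d, rest, rfl, hd⟩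
  · subst h; rfl
  · simp [nwpLoop, hd]

theorem nwpAltWord_no_space (cs : List Char) (i : Int) (a : Char)
    (h : a ∈ (nwpAltWord cs i).1) : a ≠ ' ' := by
  induction cs generalizing i with
  | nil => simp [nwpAltWord] at h
  | cons c rest ih =>
    simp only [nwpAltWord] at h
    split at h
    · simp at h
    · rename_i hc
      simp only [PySem.Chars.lower, List.map, List.cons_append, List.nil_append,
        List.mem_cons] at h
      rcases h with h | h
      · subst h
        exact lowerChar_ne_space c (by simpa using hc)
      · exact ih (i + 1) h

theorem nwpAltWord_rest_head (cs : List Char) (i : Int) (d : Char) (r : List Char)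
    (h : (nwpAltWord cs i).2.2.1 = d :: r) : PySem.Chars.isspace d = true := by
  induction cs generalizing i with
  | nil => simp [nwpAltWord] at h
  | cons c rest ih =>
    simp only [nwpAltWord] at h
    split at h
    · rename_i hc
      cases h
      exact hc
    · exact ih (i + 1) h

theorem nwpAltSkip_head (cs : List Char) (i : Int) (d : Char) (r : List Char)
    (h : (nwpAltSkip cs i).1 = d :: r) : PySem.Chars.isspace d = false := by
  induction cs generalizing i with
  | nil => simp [nwpAltSkip] at h
  | cons c rest ih =>
    simp only [nwpAltSkip] at h
    split at h
    · exact ih (i + 1) h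
    · rename_i hc
      cases h
      simpa using hc

theorem getLast?_ne_space (l₁ l₂ : List Char) (h : l₂ ≠ [])
    (hall : ∀ a ∈ l₂, a ≠ ' ') : (l₁ ++ l₂).getLast? ≠ some ' ' := by
  rw [List.getLast?_append_of_ne_nil _ h]
  intro heq
  exact hall _ (List.mem_of_getLast? heq) rfl

theorem nwpMain (n : Nat) : ∀ (cs : List Char) (i : Int) (chars : List Char) (pos : List Int),
    cs.length ≤ n → (∃ c rest, cs = c :: rest ∧ PySem.Chars.isspace c = false) →
    nwpFin (nwpLoop cs i chars pos false)
      = (chars ++ (nwpAltOuter cs i).1, pos ++ (nwpAltOuter cs i).2) := by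
  induction n with
  | zero =>
    rintro cs i chars pos hlen ⟨c, rest, rfl, hc⟩
    simp at hlen
  | succ n ih =>
    rintro cs i chars pos hlen ⟨c, rest, rfl, hc⟩
    rcases hw : nwpAltWord (c :: rest) i with ⟨wc, wp, R, j⟩
    have hw1ne : wc ≠ [] := by
      have h0 : (nwpAltWord (c :: rest) i).1 ≠ [] := by
        simp [nwpAltWord, hc, PySem.Chars.lower]
      rw [hw] at h0; exact h0
    have hwns : ∀ a ∈ wc, a ≠ ' ' := by
      intro a ha
      exact nwpAltWord_no_space (c :: rest) i a (by rw [hw]; exact ha)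
    have hwrlen : R.length ≤ rest.length := by
      have h0 : (nwpAltWord (c :: rest) i).2.2.1.length ≤ rest.length := by
        simpa [nwpAltWord, hc] using nwpAltWord_rest_len rest (i + 1)
      rw [hw] at h0; exact h0
    have houter : nwpAltOuter (c :: rest) i
        = (if (nwpAltSkip R j).1 = [] then (wc, wp)
           else (wc ++ ' ' :: (nwpAltOuter (nwpAltSkip R j).1 (nwpAltSkip R j).2).1,
                 wp ++ j :: (nwpAltOuter (nwpAltSkip R j).1 (nwpAltSkip R j).2).2)) := by
      rw [nwpAltOuter, hw]
      simp
    rw [nwpLoop_word, hw, houter]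
    simp only
    cases R with
    | nil =>
      simp only [nwpAltSkip, nwpLoop, nwpFin, if_true]
      rw [if_neg]
      intro hcon
      exact getLast?_ne_space chars wc hw1ne hwns hcon.2
    | cons d r' =>
      have hd : PySem.Chars.isspace d = true := by
        exact nwpAltWord_rest_head (c :: rest) i d r' (by rw [hw])
      have hstep : nwpLoop (d :: r') j (chars ++ wc) (pos ++ wp) false
          = nwpLoop r' (j + 1) ((chars ++ wc) ++ [' ']) ((pos ++ wp) ++ [j]) true := by
        simp [nwpLoop, hd, hw1ne]
      have hskip_eq : nwpAltSkip (d :: r') j = nwpAltSkip r' (j + 1) := by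
        simp [nwpAltSkip, hd]
      rw [hstep, nwpLoop_sep, hskip_eq]
      cases hS : (nwpAltSkip r' (j + 1)).1 with
      | nil =>
        simp only [nwpLoop, nwpFin, if_true]
        rw [if_pos]
        · simp
        · refine ⟨by simp, ?_⟩
          rw [List.getLast?_append_of_ne_nil _ (by simp : [' '] ≠ [])]
          rfl
      | cons e r'' =>
        have he : PySem.Chars.isspace e = false := nwpAltSkip_head r' (j + 1) e r'' hS
        have hSlen : (nwpAltSkip r' (j + 1)).1.length ≤ n := by
          have h1 := nwpAltSkip_len r' (j + 1)
          simp at hlen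
          have h2 : (d :: r').length ≤ rest.length := hwrlen
          simp at h2
          omega
        have hSlen' : (e :: r'').length ≤ n := by rw [← hS]; exact hSlen
        rw [nwpLoop_prev_nonspace _ _ _ _ (Or.inr ⟨e, r'', rfl, he⟩)]
        rw [ih (e :: r'') _ _ _ hSlen' ⟨e, r'', rfl, he⟩]
        rw [if_neg (by simp)]
        simp [List.append_assoc]

theorem normalize_with_positions_spec : Claim_equal_normalize_with_positions := by
  intro text _dom
  unfold Spec_normalize_with_positions normalize_with_positions normalize_with_positions_alt
  simp only
  rw [nwpLoop_lead]
  cases hS : (nwpAltSkip text.toList 0).1 with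
  | nil =>
    rw [nwpAltOuter]
    simp [nwpLoop, nwpFin]
  | cons e r =>
    have he : PySem.Chars.isspace e = false := nwpAltSkip_head text.toList 0 e r hS
    rw [nwpMain (e :: r).length (e :: r) _ [] [] le_rfl ⟨e, r, rfl, he⟩]
    simp
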